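-- pv_equiv track=rewrite | github.com/NicoleVentsch/Refining-Event-Labels | refiningEventLabels/lib/costFunction/cost.py | costMatched
-- ===== SOURCE A (Python) =====
-- from operator import itemgetter
--
-- def context(variant):
--
--     """
--     gives a two list (x,y) for the variant, the first one containing the set of predecessors of each action in the variant and the second one containing the set of successors of each action in the variant
--
--     :param variant: the variant as a list of tuples (eventID, event label) of which we get the list of predecessors and successors
--     :return: a tuple (x,y) of lists of sets, where x[i] is the set of predecessors of label on position i and y[i] the set of successors of label on position i
--
--     """
--     predecessors_list = []
--     successors_list = []
--     predecessors = []
--     successors = []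
--     empty = []
--     rest = list(map(itemgetter(1), variant[1:]))
--     predecessors_list.insert(0,empty)
--     successors_list.insert(0,rest)
--     for index in range(1,len(variant)):
--         pred_before = predecessors_list[index-1]
--         succ_before = successors_list[index-1]
--         last_label = [variant[index-1][1]]
--         current_label = variant[index][1]
--         #predecessors of current label are the predecessors of the last label plus last label
--         predecessors_list.insert(index, pred_before + last_label)
--         s_temp = succ_before.copy()
--         s_temp.remove(current_label)
--         #successors of current label are the successors of the last label minus current label
--         successors_list.insert(index, s_temp)
--     for elem in predecessors_list:
--         predecessors.append(set(elem))
--     for elem2 in successors_list: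
--         successors.append(set(elem2))
--
--     return predecessors, successors
--
-- def costMatched(variant1, variant2, mapping):
--     """
--
--     calculates the cost for labels that are matched. This cost is given as the sum of the differences in the direct/indirect neighbors of the matched pairs.
--
--     :param variant1: the first variant as a list of tuples (eventID, event label)
--     :param variant2: the second variant as a list of tuples (eventID, event label)
--     :param mapping: the mapping for which the costs for the matched labels are calculated
--     :return: the cost for the matched labels
--
--     """
--     firstId1 = variant1[0][0]
--     firstId2 = variant2[0][0]
--     pred1, succ1 = context(variant1)
--     pred2, succ2 = context(variant2)
--     sum = 0
--     for pair in mapping: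
--         p1 = pair[0]-firstId1
--         p2 = pair[1]-firstId2
--         sum += len(pred1[p1])+len(pred2[p2])-len(pred1[p1].intersection(pred2[p2])) #number of distinct predecessors
--         sum += len(succ1[p1])+len(succ2[p2])-len(succ1[p1].intersection(succ2[p2])) #number of distinct successors
--     return sum
-- ===== SOURCE B (Python) =====
-- def _neighbor_sets(labels):
--     """For each position, the set of labels before it and the set of labels after it."""
--     preds = []
--     seen = set()
--     for lab in labels:
--         preds.append(set(seen))
--         seen.add(lab)
--     succs = []
--     seen = set()
--     for lab in reversed(labels):
--         succs.append(set(seen))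
--         seen.add(lab)
--     succs.reverse()
--     return preds, succs
--
--
-- def costMatched(variant1, variant2, mapping):
--     first1 = variant1[0][0]
--     first2 = variant2[0][0]
--     preds1, succs1 = _neighbor_sets([lab for _, lab in variant1])
--     preds2, succs2 = _neighbor_sets([lab for _, lab in variant2])
--     total = 0
--     for a, b in mapping:
--         i = a - first1
--         j = b - first2
--         total += len(preds1[i] | preds2[j])
--         total += len(succs1[i] | succs2[j])
--     return total
-- ===== Notes on version B (the rewrite author's own statement) =====
-- stated objective: simpler
-- what changed: B replaces A's context() pass (incremental list concatenations plus element removal per position, then a set conversion of every list) by two plain sweeps that accumulate a running set and snapshot it at each position, and per mapped pair takes the size of the union of the two sets instead of A's len+len-len(intersection).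
import Mathlib
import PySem

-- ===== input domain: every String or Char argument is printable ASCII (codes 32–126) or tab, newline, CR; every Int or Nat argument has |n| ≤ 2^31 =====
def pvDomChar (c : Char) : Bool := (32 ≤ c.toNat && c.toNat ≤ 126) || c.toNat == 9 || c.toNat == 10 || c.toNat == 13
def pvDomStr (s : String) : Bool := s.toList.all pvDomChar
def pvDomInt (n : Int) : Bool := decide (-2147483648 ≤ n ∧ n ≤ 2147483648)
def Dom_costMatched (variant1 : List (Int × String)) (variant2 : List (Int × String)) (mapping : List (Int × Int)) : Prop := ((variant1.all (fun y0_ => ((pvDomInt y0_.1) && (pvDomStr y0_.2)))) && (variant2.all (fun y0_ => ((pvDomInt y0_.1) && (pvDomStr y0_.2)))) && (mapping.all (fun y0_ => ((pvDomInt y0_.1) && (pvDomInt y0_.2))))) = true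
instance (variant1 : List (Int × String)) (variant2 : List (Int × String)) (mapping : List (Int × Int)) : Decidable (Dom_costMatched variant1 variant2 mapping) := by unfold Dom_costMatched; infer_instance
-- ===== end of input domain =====

-- B builds the per-position predecessor/successor sets by two incremental set sweeps
-- instead of A's list surgery per position followed by set conversion, and sums union
-- sizes per pair (return-value equivalence; neither program mutates its arguments).

-- ===== PORT A =====
-- loop body of context's 'for index in range(1, len(variant))'
def pvCtxStep (variant : List (Int × String)) (st : List (List String) × List (List String)) (index : Int) : List (List String) × List (List String) :=
  let pred_before := PySem.List.pyGetD st.1 (index - 1) []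
  let succ_before := PySem.List.pyGetD st.2 (index - 1) []
  let last_label := [(PySem.List.pyGetD variant (index - 1) (0, "")).2]
  let current_label := (PySem.List.pyGetD variant index (0, "")).2
  let s_temp := (PySem.List.remove? succ_before current_label).getD succ_before
  (PySem.List.insert st.1 index (pred_before ++ last_label), PySem.List.insert st.2 index s_temp)

-- context(variant), before the set conversions at its end
def pvContextLists (variant : List (Int × String)) : List (List String) × List (List String) :=
  let rest := (PySem.List.slice variant (some 1) none).map (fun p => p.2)
  (PySem.List.pyRange 1 (variant.length : Int) 1).foldl (pvCtxStep variant)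
    (PySem.List.insert [] 0 [], PySem.List.insert [] 0 rest)

-- context(variant): the two lists of sets
def pvContext (variant : List (Int × String)) : List (PySem.Set String) × List (PySem.Set String) :=
  let pls := pvContextLists variant
  (pls.1.map (fun elem => PySem.Set.ofList elem), pls.2.map (fun elem2 => PySem.Set.ofList elem2))

def costMatched (variant1 : List (Int × String)) (variant2 : List (Int × String)) (mapping : List (Int × Int)) : Int :=
  let firstId1 := (PySem.List.pyGetD variant1 0 (0, "")).1
  let firstId2 := (PySem.List.pyGetD variant2 0 (0, "")).1
  let c1 := pvContext variant1
  let c2 := pvContext variant2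
  mapping.foldl (fun sum pair =>
    let p1 := pair.1 - firstId1
    let p2 := pair.2 - firstId2
    let pr1 := PySem.List.pyGetD c1.1 p1 []
    let pr2 := PySem.List.pyGetD c2.1 p2 []
    let su1 := PySem.List.pyGetD c1.2 p1 []
    let su2 := PySem.List.pyGetD c2.2 p2 []
    sum + (PySem.Set.len pr1 + PySem.Set.len pr2 - PySem.Set.len (PySem.Set.inter pr1 pr2))
        + (PySem.Set.len su1 + PySem.Set.len su2 - PySem.Set.len (PySem.Set.inter su1 su2))) 0

-- ===== PORT B =====
-- loop body of both sweeps in _neighbor_sets (append a copy of seen, then add the label)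
def pvSweepStep (st : List (PySem.Set String) × PySem.Set String) (lab : String) : List (PySem.Set String) × PySem.Set String :=
  (st.1 ++ [PySem.Set.ofList st.2], PySem.Set.add st.2 lab)

-- _neighbor_sets(labels)
def pvNeighborSets (labels : List String) : List (PySem.Set String) × List (PySem.Set String) :=
  let preds := labels.foldl pvSweepStep ([], PySem.Set.empty)
  let succs := labels.reverse.foldl pvSweepStep ([], PySem.Set.empty)
  (preds.1, succs.1.reverse)

def costMatched_alt (variant1 : List (Int × String)) (variant2 : List (Int × String)) (mapping : List (Int × Int)) : Int :=
  let first1 := (PySem.List.pyGetD variant1 0 (0, "")).1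
  let first2 := (PySem.List.pyGetD variant2 0 (0, "")).1
  let ns1 := pvNeighborSets (variant1.map (fun p => p.2))
  let ns2 := pvNeighborSets (variant2.map (fun p => p.2))
  mapping.foldl (fun total pair =>
    let i := pair.1 - first1
    let j := pair.2 - first2
    total
      + PySem.Set.len (PySem.Set.union (PySem.List.pyGetD ns1.1 i []) (PySem.List.pyGetD ns2.1 j []))
      + PySem.Set.len (PySem.Set.union (PySem.List.pyGetD ns1.2 i []) (PySem.List.pyGetD ns2.2 j []))) 0

-- ===== PRECONDITION & SPEC =====
-- Pre_ excludes exactly the inputs where A raises (and B raises there too): an empty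
-- variant (IndexError on variant[0][0]) or a mapping pair whose position falls outside
-- Python's index range of its variant.
def Pre_costMatched (variant1 : List (Int × String)) (variant2 : List (Int × String)) (mapping : List (Int × Int)) : Prop :=
  variant1 ≠ [] ∧ variant2 ≠ [] ∧
    ∀ pair ∈ mapping,
      PySem.Raise.InRange variant1.length (pair.1 - (variant1.headD (0, "")).1) ∧
      PySem.Raise.InRange variant2.length (pair.2 - (variant2.headD (0, "")).1)
instance (variant1 : List (Int × String)) (variant2 : List (Int × String)) (mapping : List (Int × Int)) : Decidable (Pre_costMatched variant1 variant2 mapping) := by unfold Pre_costMatched; infer_instance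

def pvWitness_costMatched : (List (Int × String)) × (List (Int × String)) × (List (Int × Int)) :=
  ([(3, "a"), (4, "b")], [(0, "b")], [(3, 0), (4, 0)])

def Spec_costMatched (variant1 : List (Int × String)) (variant2 : List (Int × String)) (mapping : List (Int × Int)) (out : Int) : Prop := out = costMatched_alt variant1 variant2 mapping
instance (variant1 : List (Int × String)) (variant2 : List (Int × String)) (mapping : List (Int × Int)) (out : Int) : Decidable (Spec_costMatched variant1 variant2 mapping out) := by unfold Spec_costMatched; infer_instance

-- ===== CLAIM (what is proved, stated in full; the proofs are below) =====
def Claim_equal_costMatched : Prop := ∀ (variant1 : List (Int × String)) (variant2 : List (Int × String)) (mapping : List (Int × Int)), Dom_costMatched variant1 variant2 mapping → Pre_costMatched variant1 variant2 mapping → Spec_costMatched variant1 variant2 mapping (costMatched variant1 variant2 mapping)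

-- ===== LEMMAS AND PROOFS =====

theorem pvInsert_end {α : Type} (xs : List α) (v : α) :
    PySem.List.insert xs (xs.length : Int) v = xs ++ [v] := by
  simp [PySem.List.insert, PySem.List.sliceIndices]
  rw [if_neg (by omega)]
  simp

theorem pvInsert_nil {α : Type} (v : α) : PySem.List.insert ([] : List α) 0 v = [v] := by
  simp [PySem.List.insert, PySem.List.sliceIndices]

-- state of the context loop after indices 1..m-1
theorem pvCtx_loop (v : List (Int × String)) (m : ℕ) (h1 : 1 ≤ m) (hn : m ≤ v.length) :
    (PySem.List.pyRange 1 (m : Int) 1).foldl (pvCtxStep v)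
        ([[]], [(v.map (fun p => p.2)).drop 1]) =
      ((List.range m).map fun i => (v.map (fun p => p.2)).take i,
       (List.range m).map fun i => (v.map (fun p => p.2)).drop (i + 1)) := by
  induction m, h1 using Nat.le_induction with
  | base => simp [PySem.List.pyRange]
  | succ m hm ih =>
    have hmn : m < v.length := by omega
    have hcast : ((m + 1 : ℕ) : Int) = (m : Int) + 1 := by push_cast; ring
    rw [hcast, PySem.List.pyRange_one_succ_right (by exact_mod_cast hm), List.foldl_append,
      ih (by omega)]
    set labels := v.map (fun p => p.2) with hl
    have hlen : labels.length = v.length := by simp [hl]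
    show pvCtxStep v _ (m : Int) = _
    have e1 : ((m : Int) - 1) = ((m - 1 : ℕ) : Int) := by omega
    unfold pvCtxStep
    simp only [e1, PySem.List.pyGetD_natCast]
    have g1 : ((List.range m).map fun i => labels.take i).getD (m - 1) [] = labels.take (m - 1) := by
      simp [List.getD, List.getElem?_map, List.getElem?_range (by omega : m - 1 < m)]
    have g2 : ((List.range m).map fun i => labels.drop (i + 1)).getD (m - 1) [] = labels.drop m := by
      have : m - 1 + 1 = m := by omega
      simp [List.getD, List.getElem?_map, List.getElem?_range (by omega : m - 1 < m), this]
    have g3 : (v.getD (m - 1) (0, "")).2 = labels[m - 1]'(by omega) := by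
      simp [List.getD, List.getElem?_eq_getElem (by omega : m - 1 < v.length), hl]
    have g4 : (v.getD m (0, "")).2 = labels[m]'(by omega) := by
      simp [List.getD, List.getElem?_eq_getElem hmn, hl]
    have hdrop : labels.drop m = labels[m]'(by omega) :: labels.drop (m + 1) := by
      rw [List.drop_eq_getElem_cons (by omega)]
    have ins : ∀ (xs : List (List String)) (x : List String), xs.length = m →
        PySem.List.insert xs (m : Int) x = xs ++ [x] := by
      intro xs x h
      rw [← h, pvInsert_end]
    have htake : labels.take (m - 1) ++ [labels[m - 1]'(by omega)] = labels.take m := by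
      have hm' : m - 1 + 1 = m := by omega
      conv_rhs => rw [← hm']
      rw [List.take_add_one, List.getElem?_eq_getElem (by omega)]
      simp
    rw [g1, g2, g3, g4, hdrop, PySem.List.remove?_cons_self]
    simp only [Option.getD_some]
    rw [ins _ _ (by simp), ins _ _ (by simp)]
    simp [List.range_succ, htake]

theorem pvContext_eq (v : List (Int × String)) (hv : v ≠ []) :
    pvContext v =
      ((List.range v.length).map fun i => PySem.Set.ofList ((v.map (fun p => p.2)).take i),
       (List.range v.length).map fun i => PySem.Set.ofList ((v.map (fun p => p.2)).drop (i + 1))) := by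
  unfold pvContext pvContextLists
  have hrest : (PySem.List.slice v (some 1) none).map (fun p => p.2) =
      (v.map (fun p => p.2)).drop 1 := by
    rw [PySem.List.slice_from_one, ← List.drop_one, List.map_drop]
  simp only [hrest, pvInsert_nil]
  rw [pvCtx_loop v v.length (List.length_pos_of_ne_nil hv) le_rfl]
  simp [List.map_map, Function.comp]

theorem pvSwap (s t : List String) (hs : s.Nodup) (ht : t.Nodup) :
    (s.filter (fun x => t.contains x)).length = (t.filter (fun x => s.contains x)).length := by
  have hp : (s.filter (fun x => t.contains x)).Perm (t.filter (fun x => s.contains x)) := by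
    rw [List.perm_ext_iff_of_nodup (hs.filter _) (ht.filter _)]
    intro a
    simp [List.mem_filter, and_comm]
  exact hp.length_eq

-- inclusion–exclusion: |s| + |t| - |s ∩ t| = |s ∪ t| for Python sets
theorem pvIE (s t : List String) (hs : s.Nodup) (ht : t.Nodup) :
    PySem.Set.len s + PySem.Set.len t - PySem.Set.len (PySem.Set.inter s t) =
      PySem.Set.len (PySem.Set.union s t) := by
  unfold PySem.Set.len PySem.Set.union PySem.Set.inter
  rw [PySem.Set.update_eq_append_filter]
  simp only [PySem.Set.ofList_eq_self_of_nodup t ht]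
  have hpart := List.length_eq_length_filter_add (l := t) (fun x => PySem.Set.contains s x)
  have hsw := pvSwap s t hs ht
  simp only [List.length_append]
  have : (List.filter (fun x => PySem.Set.contains t x) s).length
      = (List.filter (fun x => PySem.Set.contains s x) t).length := by
    simpa [PySem.Set.contains_eq_listContains] using hsw
  push_cast
  omega

-- unions of sets with the same members have the same size
theorem pvLenUnion_congr (s t s' t' : List String) (hs : s.Nodup) (hs' : s'.Nodup)
    (hms : ∀ x, x ∈ s' ↔ x ∈ s) (hmt : ∀ x, x ∈ t' ↔ x ∈ t) :
    PySem.Set.len (PySem.Set.union s' t') = PySem.Set.len (PySem.Set.union s t) := by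
  have hp : (PySem.Set.union s' t').Perm (PySem.Set.union s t) := by
    rw [List.perm_ext_iff_of_nodup (PySem.Set.nodup_union _ _ hs') (PySem.Set.nodup_union _ _ hs)]
    intro a
    simp [PySem.Set.mem_union, hms a, hmt a]
  unfold PySem.Set.len
  rw [hp.length_eq]

-- assembling one mapped pair's contribution: inclusion–exclusion on the left,
-- unions (with successor sets listed in reverse order) on the right
theorem pvFinal (acc : Int) (p1 p2 s1 s2 s1' s2' : List String)
    (hp1 : p1.Nodup) (hp2 : p2.Nodup) (hs1 : s1.Nodup) (hs2 : s2.Nodup) (hs1' : s1'.Nodup)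
    (hm1 : ∀ x, x ∈ s1' ↔ x ∈ s1) (hm2 : ∀ x, x ∈ s2' ↔ x ∈ s2) :
    acc + (PySem.Set.len p1 + PySem.Set.len p2 - PySem.Set.len (PySem.Set.inter p1 p2))
        + (PySem.Set.len s1 + PySem.Set.len s2 - PySem.Set.len (PySem.Set.inter s1 s2)) =
      acc + PySem.Set.len (PySem.Set.union p1 p2) + PySem.Set.len (PySem.Set.union s1' s2') := by
  rw [pvIE p1 p2 hp1 hp2, pvIE s1 s2 hs1 hs2,
    pvLenUnion_congr s1 s2 s1' s2' hs1 hs1' hm1 hm2]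

-- Python's index for p in range [-n, n)
theorem pvGetMapRange {β : Type} (f : ℕ → β) (n : ℕ) (d : β) (p : Int)
    (h : PySem.Raise.InRange n p) :
    PySem.List.pyGetD ((List.range n).map f) p d = f ((if p < 0 then p + n else p).toNat) := by
  obtain ⟨hlo, hhi⟩ := h
  by_cases hp : p < 0
  · have hk : p = -(((-p).toNat : ℕ) : Int) := by omega
    rw [if_pos hp, show ((p + (n : Int)).toNat) = n - (-p).toNat from by omega]
    conv_lhs => rw [hk]
    rw [PySem.List.pyGetD_neg_natCast _ _ _ (by omega) (by simp; omega)]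
    simp
  · rw [if_neg hp, PySem.List.pyGetD_eq_getElem _ d (by omega) (by simp; omega)]
    simp

-- one sweep: the accumulated list holds a snapshot of seen before each element
theorem pvSweep_fst (l : List String) (acc : List (PySem.Set String)) (s : PySem.Set String) :
    (l.foldl pvSweepStep (acc, s)).1 =
      acc ++ (List.range l.length).map
        (fun k => PySem.Set.ofList (PySem.Set.update s (l.take k))) := by
  induction l generalizing acc s with
  | nil => simp
  | cons lab l ih =>
    rw [List.foldl_cons]
    show (l.foldl pvSweepStep (acc ++ [PySem.Set.ofList s], PySem.Set.add s lab)).1 = _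
    rw [ih]
    simp only [List.length_cons, List.range_succ_eq_map, List.map_cons, List.map_map]
    simp [Function.comp, PySem.Set.update_nil, PySem.Set.update_cons, List.take_succ_cons]

-- the predecessor sets of _neighbor_sets
theorem pvNeighbor_preds (l : List String) :
    (pvNeighborSets l).1 =
      (List.range l.length).map (fun k => PySem.Set.ofList (l.take k)) := by
  show (l.foldl pvSweepStep ([], PySem.Set.empty)).1 = _
  rw [pvSweep_fst]
  simp [PySem.Set.update_nil_left, PySem.Set.ofList_ofList]

-- the successor sets of _neighbor_sets
theorem pvNeighbor_succs (l : List String) :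
    (pvNeighborSets l).2 =
      (List.range l.length).map (fun k => PySem.Set.ofList ((l.drop (k + 1)).reverse)) := by
  show ((l.reverse.foldl pvSweepStep ([], PySem.Set.empty)).1).reverse = _
  rw [pvSweep_fst]
  simp only [List.nil_append, List.length_reverse]
  apply List.ext_getElem
  · simp
  · intro i h1 h2
    simp only [List.getElem_reverse, List.getElem_map, List.getElem_range,
      List.length_map, List.length_range] at *
    rw [PySem.Set.update_empty, PySem.Set.ofList_ofList,
      show l.length - 1 - i = l.length - (i + 1) from by omega, ← List.reverse_drop]

-- ===== VERDICT (by name: the statement is the Claim_ definition above) =====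
theorem costMatched_spec : Claim_equal_costMatched := by
  intro v1 v2 mapping hdom hpre
  obtain ⟨h1, h2, hmap⟩ := hpre
  unfold Spec_costMatched
  obtain ⟨x1, t1, rfl⟩ : ∃ x t, v1 = x :: t := by
    cases v1
    · exact absurd rfl h1
    · exact ⟨_, _, rfl⟩
  obtain ⟨x2, t2, rfl⟩ : ∃ x t, v2 = x :: t := by
    cases v2
    · exact absurd rfl h2
    · exact ⟨_, _, rfl⟩
  simp only [costMatched, costMatched_alt, pvContext_eq _ (List.cons_ne_nil _ _),
    PySem.List.pyGetD_zero_cons, pvNeighbor_preds, pvNeighbor_succs]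
  refine PySem.List.foldl_congr_mem _ _ _ _ ?_
  intro acc pair hmem
  obtain ⟨hin1, hin2⟩ := hmap pair hmem
  simp only [List.headD_cons] at hin1 hin2
  have hl1 : ((x1 :: t1).map (fun p => p.2)).length = (x1 :: t1).length := by simp
  have hl2 : ((x2 :: t2).map (fun p => p.2)).length = (x2 :: t2).length := by simp
  simp only [pvGetMapRange _ _ _ _ hin1, pvGetMapRange _ _ _ _ hin2, hl1, hl2]
  exact pvFinal acc _ _ _ _ _ _ (PySem.Set.nodup_ofList _) (PySem.Set.nodup_ofList _)
    (PySem.Set.nodup_ofList _) (PySem.Set.nodup_ofList _) (PySem.Set.nodup_ofList _)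
    (fun x => by simp [PySem.Set.mem_ofList])
    (fun x => by simp [PySem.Set.mem_ofList])
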